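-- pv_equiv track=rewrite | github.com/y3bishop3y/cthulhu-dmd | scripts/utils/parsing.py | find_power_section
-- ===== SOURCE A (Python) =====
-- from typing import Final, Dict, List, Optional, Tuple
--
-- def find_power_section(text: str, power_name: str, context_lines: int = 5) -> Optional[str]:
--     """Find the section of text related to a specific power.
--
--     Args:
--         text: Full text to search
--         power_name: Name of the power to find
--         context_lines: Number of lines of context to include
--
--     Returns:
--         Power section text if found, None otherwise
--     """
--     lines = text.split("\n")
--     power_start = None
--
--     # Find where the power is mentioned
--     for i, line in enumerate(lines):
--         if power_name.lower() in line.lower():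
--             power_start = i
--             break
--
--     if power_start is None:
--         return None
--
--     # Extract section with context
--     start = max(0, power_start - context_lines)
--     end = min(len(lines), power_start + 20)  # Look ahead more
--
--     section_lines = lines[start:end]
--     return "\n".join(section_lines)
-- ===== SOURCE B (Python) =====
-- from typing import Optional
--
-- def find_power_section(text: str, power_name: str, context_lines: int = 5) -> Optional[str]:
--     # Search the flat lowered text once instead of scanning line by line.
--     # A needle containing a newline can never occur inside a single line.
--     if "\n" in power_name:
--         return None
--     low = text.lower()
--     idx = low.find(power_name.lower())
--     if idx == -1:
--         return None
--     power_start = low[:idx].count("\n")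
--     lines = text.split("\n")
--     start = max(0, power_start - context_lines)
--     end = min(len(lines), power_start + 20)
--     return "\n".join(lines[start:end])
-- ===== Notes on version B (the rewrite author's own statement) =====
-- stated objective: alternative
-- what changed: B lowercases the whole text once and finds the needle with a single flat str.find, recovering the line number by counting newlines before the hit, instead of A's per-line lowercase-and-substring scan; a needle containing a newline is rejected up front since it can never occur inside one line.
import Mathlib
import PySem

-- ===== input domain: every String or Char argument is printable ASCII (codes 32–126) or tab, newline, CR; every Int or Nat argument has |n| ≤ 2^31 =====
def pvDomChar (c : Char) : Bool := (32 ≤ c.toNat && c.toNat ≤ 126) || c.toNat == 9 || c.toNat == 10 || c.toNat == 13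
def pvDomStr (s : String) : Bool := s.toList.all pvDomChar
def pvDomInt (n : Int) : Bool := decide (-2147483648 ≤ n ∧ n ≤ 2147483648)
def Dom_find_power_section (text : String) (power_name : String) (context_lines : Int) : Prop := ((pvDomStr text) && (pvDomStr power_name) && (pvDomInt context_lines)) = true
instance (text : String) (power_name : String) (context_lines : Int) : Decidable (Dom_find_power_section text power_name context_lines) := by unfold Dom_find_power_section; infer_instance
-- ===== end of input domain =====

-- B searches the flat lowered text once with str.find and counts newlines before the hit,
-- instead of A's line-by-line substring scan; same return value everywhere (objective: alternative).

-- ===== PORT A =====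
-- the 'for i, line in enumerate(lines): if power_name.lower() in line.lower(): power_start = i; break' loop
def pyFindLoop (power_name : String) : List String → Nat → Option Nat
  | [], _ => none
  | line :: rest, i =>
    if PySem.Str.isIn (PySem.Str.lower power_name) (PySem.Str.lower line) then some i
    else pyFindLoop power_name rest (i + 1)

def find_power_section (text : String) (power_name : String) (context_lines : Int) : Option String :=
  let lines := (PySem.Str.split? text "\n").getD []   -- text.split("\n"); sep ≠ "" so split? is `some`
  match pyFindLoop power_name lines 0 with
  | none => none
  | some power_start =>
      let start := max 0 ((power_start : Int) - context_lines)
      let stop := min (PySem.List.len lines) ((power_start : Int) + 20)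
      some (PySem.Str.join "\n" (PySem.List.slice lines (some start) (some stop)))

-- ===== PORT B =====
def find_power_section_alt (text : String) (power_name : String) (context_lines : Int) : Option String :=
  if PySem.Str.isIn "\n" power_name then none
  else
    let low := PySem.Str.lower text
    let idx := PySem.Str.find low (PySem.Str.lower power_name)
    if idx == -1 then none
    else
      let power_start : Int := (PySem.Str.count (PySem.Str.slice low none (some idx)) "\n" : Int)
      let lines := (PySem.Str.split? text "\n").getD []
      let start := max 0 (power_start - context_lines)
      let stop := min (PySem.List.len lines) (power_start + 20)
      some (PySem.Str.join "\n" (PySem.List.slice lines (some start) (some stop)))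

-- ===== PRECONDITION & SPEC =====
def Spec_find_power_section (text : String) (power_name : String) (context_lines : Int) (out : Option String) : Prop := out = find_power_section_alt text power_name context_lines
instance (text : String) (power_name : String) (context_lines : Int) (out : Option String) : Decidable (Spec_find_power_section text power_name context_lines out) := by unfold Spec_find_power_section; infer_instance

-- ===== CLAIM (what is proved, stated in full; the proofs are below) =====
def Claim_equal_find_power_section : Prop := ∀ (text : String) (power_name : String) (context_lines : Int), Dom_find_power_section text power_name context_lines → Spec_find_power_section text power_name context_lines (find_power_section text power_name context_lines)

-- ===== LEMMAS AND PROOFS =====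
def linesOf : List Char → List (List Char)
  | [] => [[]]
  | c :: rest => if c = '\n' then [] :: linesOf rest else (linesOf rest).modifyHead (c :: ·)


def firstHit (n : List Char) : List (List Char) → Option Nat
  | [] => none
  | l :: rest => if PySem.Chars.isIn n l then some 0 else (firstHit n rest).map (· + 1)

theorem linesOf_ne_nil (cs : List Char) : linesOf cs ≠ [] := by
  induction cs with
  | nil => simp [linesOf]
  | cons c rest ih =>
    simp only [linesOf]
    split
    · simp
    · cases h : linesOf rest with
      | nil => exact absurd h ih
      | cons a t => simp [List.modifyHead]

theorem linesOf_no_nl {cs : List Char} (h : '\n' ∉ cs) : linesOf cs = [cs] := by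
  induction cs with
  | nil => rfl
  | cons c rest ih =>
    simp only [List.mem_cons, not_or] at h
    simp [linesOf, ih h.2, List.modifyHead]
    exact fun hc => h.1 hc.symm

theorem linesOf_append_nl {a : List Char} (b : List Char) (h : '\n' ∉ a) :
    linesOf (a ++ '\n' :: b) = a :: linesOf b := by
  induction a with
  | nil => simp [linesOf]
  | cons c rest ih =>
    simp only [List.mem_cons, not_or] at h
    rw [List.cons_append, linesOf, if_neg (fun hc => h.1 hc.symm), ih h.2, List.modifyHead]

theorem mem_linesOf_no_nl {cs l : List Char} (h : l ∈ linesOf cs) : '\n' ∉ l := by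
  induction cs generalizing l with
  | nil => simp [linesOf] at h; simp [h]
  | cons c rest ih =>
    simp only [linesOf] at h
    split at h
    · rcases List.mem_cons.mp h with h | h
      · simp [h]
      · exact ih h
    · rename_i hc
      cases hl : linesOf rest with
      | nil => exact absurd hl (linesOf_ne_nil rest)
      | cons a t =>
        rw [hl, List.modifyHead] at h
        rcases List.mem_cons.mp h with h | h
        · subst h
          intro hm
          rcases List.mem_cons.mp hm with h | h
          · exact hc h.symm
          · exact ih (hl ▸ List.mem_cons_self ..) h
        · exact ih (hl ▸ List.mem_cons_of_mem _ h)
theorem splitOn_go_nl (fuel : Nat) : ∀ (l cur : List Char) (acc : List (List Char)),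
    l.length ≤ fuel →
    PySem.Chars.splitOn.go ['\n'] fuel l cur acc
      = acc.reverse ++ (linesOf l).modifyHead (cur.reverse ++ ·) := by
  induction fuel with
  | zero =>
    intro l cur acc h
    have : l = [] := List.length_eq_zero_iff.mp (Nat.le_zero.mp h)
    subst this
    simp [PySem.Chars.splitOn.go, linesOf, List.modifyHead]
  | succ fuel ih =>
    intro l cur acc h
    cases l with
    | nil => simp [PySem.Chars.splitOn.go, linesOf, List.modifyHead]
    | cons c rest =>
      rw [PySem.Chars.splitOn.go]
      simp only [List.isPrefixOf, List.isPrefixOf_nil_left, Bool.and_true]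
      by_cases hc : c = '\n'
      · rw [if_pos (by simp [hc]), ih _ _ _ (by simpa using Nat.le_of_succ_le_succ h)]
        simp [linesOf, hc, List.modifyHead]
        cases hl : linesOf rest with
        | nil => simp [List.modifyHead]
        | cons a t => simp [List.modifyHead]
      · rw [if_neg (by simp only [List.isPrefixOf, Bool.and_true, beq_iff_eq]; exact fun hcc => hc hcc.symm), ih _ _ _ (Nat.le_of_succ_le_succ (by simpa using h))]
        simp only [linesOf, if_neg hc]
        cases hl : linesOf rest with
        | nil => simp [List.modifyHead]
        | cons a t => simp [List.modifyHead]

theorem splitOn_nl (cs : List Char) : PySem.Chars.splitOn cs ['\n'] = linesOf cs := by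
  rw [PySem.Chars.splitOn, splitOn_go_nl _ _ _ _ (Nat.le_succ_of_le (Nat.le_refl _))]
  cases hl : linesOf cs with
  | nil => simp [List.modifyHead]
  | cons a t => simp [List.modifyHead]

theorem count_go_nl (fuel : Nat) : ∀ (l : List Char) (acc : Nat), l.length ≤ fuel →
    PySem.Chars.count.go ['\n'] fuel l acc = acc + l.count '\n' := by
  induction fuel with
  | zero =>
    intro l acc h
    have : l = [] := List.length_eq_zero_iff.mp (Nat.le_zero.mp h)
    subst this
    simp [PySem.Chars.count.go]
  | succ fuel ih =>
    intro l acc h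
    cases l with
    | nil => simp [PySem.Chars.count.go]
    | cons c rest =>
      rw [PySem.Chars.count.go]
      simp only [List.isPrefixOf, List.isPrefixOf_nil_left, Bool.and_true]
      by_cases hc : c = '\n'
      · rw [if_pos (by simp [hc]), ih _ _ (by simpa using Nat.le_of_succ_le_succ h)]
        simp [hc, List.count_cons]
        omega
      · rw [if_neg (by simp only [List.isPrefixOf, List.isPrefixOf_nil_left, Bool.and_true, beq_iff_eq]; exact fun hcc => hc hcc.symm), ih _ _ (Nat.le_of_succ_le_succ (by simpa using h))]
        simp only [List.count_cons, beq_iff_eq]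
        rw [if_neg hc]
        omega

theorem count_nl (cs : List Char) : PySem.Chars.count cs ['\n'] = cs.count '\n' := by
  rw [PySem.Chars.count]
  simp only [List.isEmpty_cons, if_false, Bool.false_eq_true]
  exact (count_go_nl _ _ _ (Nat.le_refl _)).trans (by omega)

theorem lowerChar_nl (c : Char) : PySem.Chars.lowerChar c = '\n' ↔ c = '\n' := by
  rw [PySem.Chars.lowerChar, PySem.Chars.isupper]
  split
  · rename_i hup
    simp only [Bool.and_eq_true, decide_eq_true_eq] at hup
    have h1 : 65 ≤ c.toNat := UInt32.le_iff_toNat_le.mp (Char.le_def.mp hup.1)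
    have h2 : c.toNat ≤ 90 := UInt32.le_iff_toNat_le.mp (Char.le_def.mp hup.2)
    constructor
    · intro h
      have hv : (c.toNat + 32).isValidChar := by
        constructor
        omega
      have hnl : (Char.ofNat (c.toNat + 32)).toNat = ('\n' : Char).toNat := by rw [h]
      rw [Char.toNat_ofNat, if_pos hv] at hnl
      have : ('\n' : Char).toNat = 10 := rfl
      omega
    · intro h
      have : c.toNat = 10 := by subst h; rfl
      omega
  · exact Iff.rfl

theorem linesOf_lower (cs : List Char) :
    linesOf (PySem.Chars.lower cs) = (linesOf cs).map PySem.Chars.lower := by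
  induction cs with
  | nil => rfl
  | cons c rest ih =>
    simp only [PySem.Chars.lower, List.map_cons] at *
    by_cases hc : c = '\n'
    · rw [linesOf, if_pos ((lowerChar_nl c).mpr hc), linesOf, if_pos hc, ih]
      rfl
    · rw [linesOf, if_neg (fun h => hc ((lowerChar_nl c).mp h)), linesOf, if_neg hc, ih]
      cases linesOf rest with
      | nil => rfl
      | cons a t => rfl

theorem mem_lower_nl (xs : List Char) : '\n' ∈ PySem.Chars.lower xs ↔ '\n' ∈ xs := by
  rw [PySem.Chars.lower, List.mem_map]
  constructor
  · rintro ⟨c, hc, hl⟩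
    exact (lowerChar_nl c).mp hl ▸ ((lowerChar_nl c).mp hl ▸ hc)
  · intro h
    exact ⟨'\n', h, rfl⟩

theorem prefix_append_sep {n a : List Char} (b : List Char) {sep : Char} {i : Nat}
    (hi : i ≤ a.length) (hs : sep ∉ n) :
    n <+: (a ++ sep :: b).drop i ↔ n <+: a.drop i := by
  rw [List.drop_append_of_le_length hi]
  constructor
  · intro h
    by_cases hl : n.length ≤ (a.drop i).length
    · have := List.prefix_iff_eq_take.mp h
      rw [List.take_append_of_le_length hl] at this
      rw [this]
      exact List.take_prefix _ _
    · exfalso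
      push_neg at hl
      have hlt : (a.drop i).length < n.length := hl
      have hget := h.getElem (i := (a.drop i).length) hlt
      have hmem := List.getElem_mem hlt
      rw [hget] at hmem
      simp at hmem
      exact hs hmem
  · intro h
    exact h.trans (List.prefix_append _ _)

theorem infix_split {n a : List Char} (b : List Char) {sep : Char} (hs : sep ∉ n) :
    n <:+: (a ++ sep :: b) ↔ (n <:+: a ∨ n <:+: b) := by
  constructor
  · rintro ⟨s, t, hst⟩
    have hdrop : n <+: (a ++ sep :: b).drop s.length := by
      rw [← hst, List.append_assoc, List.drop_append_of_le_length (Nat.le_refl s.length)]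
      simp
    by_cases hi : s.length ≤ a.length
    · left
      have := (prefix_append_sep b hi hs).mp hdrop
      exact this.isInfix.trans (List.drop_suffix _ _).isInfix
    · right
      push_neg at hi
      rw [List.drop_append, List.drop_eq_nil_of_le (Nat.le_of_lt hi), List.nil_append] at hdrop
      have hk : s.length - a.length = (s.length - a.length - 1) + 1 := by omega
      rw [hk, List.drop_succ_cons] at hdrop
      exact hdrop.isInfix.trans (List.drop_suffix _ _).isInfix
  · rintro (h | h)
    · exact h.trans (List.prefix_append _ _).isInfix
    · exact h.trans (List.suffix_append_of_suffix (List.suffix_cons _ _)).isInfix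

theorem find_char {cs n : List Char} {m : Nat} (h1 : n <+: cs.drop m)
    (h2 : ∀ i < m, ¬ n <+: cs.drop i) : PySem.Chars.find cs n = m := by
  have hinf : n <:+: cs := h1.isInfix.trans (List.drop_suffix _ _).isInfix
  have hpos : 0 ≤ PySem.Chars.find cs n := (PySem.Chars.find_nonneg_iff _ _).mpr hinf
  obtain ⟨hocc, hmin⟩ := PySem.Chars.find_spec hpos
  have heq : (PySem.Chars.find cs n).toNat = m := by
    rcases Nat.lt_trichotomy (PySem.Chars.find cs n).toNat m with h | h | h
    · exact absurd hocc (h2 _ h)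
    · exact h
    · exact absurd h1 (hmin _ h)
  omega

theorem firstHit_none_aux {n : List Char} (hn : '\n' ∈ n) (M : List (List Char))
    (hM : ∀ l ∈ M, '\n' ∉ l) : firstHit n M = none := by
  induction M with
  | nil => rfl
  | cons l rest ih =>
    rw [firstHit]
    rw [if_neg, ih (fun x hx => hM x (List.mem_cons_of_mem _ hx))]
    · rfl
    · intro hin
      exact hM l (List.mem_cons_self ..) (((PySem.Chars.isIn_iff_infix _ _).mp hin).sublist.subset hn)

theorem firstHit_none_of_nl {n : List Char} (hn : '\n' ∈ n) (cs : List Char) :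
    firstHit n (linesOf cs) = none :=
  firstHit_none_aux hn _ (fun _ hl => mem_linesOf_no_nl hl)

theorem pyFindLoop_eq (pn : String) (L : List String) (i : Nat) :
    pyFindLoop pn L i
      = (firstHit (PySem.Chars.lower pn.toList)
          (L.map (fun s => PySem.Chars.lower s.toList))).map (i + ·) := by
  induction L generalizing i with
  | nil => rfl
  | cons line rest ih =>
    rw [List.map_cons, pyFindLoop, firstHit]
    rw [PySem.Str.isIn_eq, PySem.Str.toList_lower, PySem.Str.toList_lower]
    split
    · simp
    · rw [ih]
      cases firstHit (PySem.Chars.lower pn.toList) (rest.map (fun s => PySem.Chars.lower s.toList)) with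
      | none => rfl
      | some k => simp; omega

theorem case_nonl {n : List Char} (cs : List Char) (h : '\n' ∉ cs) :
    (PySem.Chars.find cs n = -1 → firstHit n (linesOf cs) = none)
    ∧ (∀ m : Nat, PySem.Chars.find cs n = (m : Int) →
        firstHit n (linesOf cs) = some ((cs.take m).count '\n')) := by
  rw [linesOf_no_nl h]
  constructor
  · intro hf
    rw [firstHit, if_neg, firstHit]
    · rfl
    · rw [PySem.Chars.isIn_iff_infix]
      exact (PySem.Chars.find_eq_neg_one_iff _ _).mp hf
  · intro m hf
    have hin : n <:+: cs := by
      rw [← PySem.Chars.find_nonneg_iff, hf]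
      exact Int.natCast_nonneg m
    rw [firstHit, if_pos ((PySem.Chars.isIn_iff_infix _ _).mpr hin)]
    have : (cs.take m).count '\n' = 0 := by
      rw [List.count_eq_zero]
      exact fun hm => h ((List.take_sublist _ _).subset hm)
    rw [this]

theorem mainFind_aux (n : List Char) (hn : '\n' ∉ n) :
    ∀ (len : Nat) (cs : List Char), cs.length ≤ len →
    (PySem.Chars.find cs n = -1 → firstHit n (linesOf cs) = none)
    ∧ (∀ m : Nat, PySem.Chars.find cs n = (m : Int) →
        firstHit n (linesOf cs) = some ((cs.take m).count '\n')) := by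
  intro len
  induction len with
  | zero =>
    intro cs hcs
    have : cs = [] := List.length_eq_zero_iff.mp (Nat.le_zero.mp hcs)
    subst this
    exact case_nonl [] (by simp)
  | succ len ih =>
    intro cs hcs
    by_cases hmem : '\n' ∈ cs
    · -- decompose at the first newline
      have hd : List.dropWhile (fun c => c != '\n') cs ≠ [] := by
        intro hnil
        rw [List.dropWhile_eq_nil_iff] at hnil
        simpa using hnil _ hmem
      have hhead : (List.dropWhile (fun c => c != '\n') cs).head hd = '\n' := by
        have := List.head_dropWhile_not (fun c => c != '\n') hd
        simpa using this
      have hsplit : cs = List.takeWhile (fun c => c != '\n') cs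
          ++ '\n' :: (List.dropWhile (fun c => c != '\n') cs).tail := by
        have h3 := (List.cons_head_tail hd).symm
        rw [hhead] at h3
        conv_lhs => rw [← List.takeWhile_append_dropWhile (p := fun c => c != '\n') (l := cs)]
        rw [h3, List.tail_cons]
      set A := List.takeWhile (fun c => c != '\n') cs with hAdef
      set B := (List.dropWhile (fun c => c != '\n') cs).tail with hBdef
      have hA : '\n' ∉ A := by
        intro hx
        simpa using List.mem_takeWhile_imp hx
      have hBlen : B.length ≤ len := by
        have h2 := congrArg List.length hsplit
        rw [List.length_append, List.length_cons] at h2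
        omega
      have ihb := ih B hBlen
      rw [hsplit, linesOf_append_nl B hA]
      by_cases hinA : n <:+: A
      · constructor
        · intro hf
          rw [PySem.Chars.find_eq_neg_one_iff] at hf
          exact absurd ((infix_split B hn).mpr (Or.inl hinA)) hf
        · intro m hf
          rw [firstHit, if_pos ((PySem.Chars.isIn_iff_infix _ _).mpr hinA)]
          -- first occurrence lies inside A, so no newline before it
          obtain ⟨s, t, hst⟩ := hinA
          have hsl : s.length ≤ A.length := by
            have := congrArg List.length hst
            simp at this
            omega
          have hoccA : n <+: A.drop s.length := by
            rw [← hst, List.append_assoc, List.drop_append_of_le_length (Nat.le_refl _)]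
            simp
          have hocc : n <+: (A ++ '\n' :: B).drop s.length :=
            (prefix_append_sep B hsl hn).mpr hoccA
          have hpos : 0 ≤ PySem.Chars.find (A ++ '\n' :: B) n := by
            rw [hf]; exact Int.natCast_nonneg m
          obtain ⟨_, hmin⟩ := PySem.Chars.find_spec hpos
          have hmA : m ≤ A.length := by
            by_contra hgt
            push_neg at hgt
            have : (PySem.Chars.find (A ++ '\n' :: B) n).toNat ≤ s.length := by
              by_contra hgt2
              push_neg at hgt2
              exact hmin s.length hgt2 hocc
            rw [hf] at this
            simp at this
            omega
          rw [List.take_append_of_le_length hmA]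
          have : (A.take m).count '\n' = 0 := by
            rw [List.count_eq_zero]
            exact fun hx => hA ((List.take_sublist _ _).subset hx)
          rw [this]
      · have hmiss : ¬ (PySem.Chars.isIn n A = true) := by
          rw [PySem.Chars.isIn_iff_infix]
          exact hinA
        rw [firstHit, if_neg hmiss]
        constructor
        · intro hf
          rw [PySem.Chars.find_eq_neg_one_iff, infix_split B hn] at hf
          push_neg at hf
          rw [ihb.1 ((PySem.Chars.find_eq_neg_one_iff _ _).mpr hf.2)]
          rfl
        · intro m hf
          have hinf : n <:+: (A ++ '\n' :: B) := by
            rw [← PySem.Chars.find_nonneg_iff, hf]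
            exact Int.natCast_nonneg m
          have hinB : n <:+: B := ((infix_split B hn).mp hinf).resolve_left hinA
          have hfB : 0 ≤ PySem.Chars.find B n := (PySem.Chars.find_nonneg_iff _ _).mpr hinB
          set mb := (PySem.Chars.find B n).toNat with hmb
          have hfB' : PySem.Chars.find B n = (mb : Int) := (Int.toNat_of_nonneg hfB).symm
          obtain ⟨hoccB, hminB⟩ := PySem.Chars.find_spec hfB
          have hdropEq : ∀ k : Nat, (A ++ '\n' :: B).drop (A.length + 1 + k) = B.drop k := by
            intro k
            rw [List.drop_append, List.drop_eq_nil_of_le (by omega), List.nil_append]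
            have : A.length + 1 + k - A.length = k + 1 := by omega
            rw [this, List.drop_succ_cons]
          have hfind : PySem.Chars.find (A ++ '\n' :: B) n = ((A.length + 1 + mb : Nat) : Int) := by
            apply find_char
            · rw [hdropEq]
              exact hoccB
            · intro i hi
              by_cases hii : i ≤ A.length
              · intro hpre
                exact hinA (((prefix_append_sep B hii hn).mp hpre).isInfix.trans
                  (List.drop_suffix _ _).isInfix)
              · push_neg at hii
                have hk : i = A.length + 1 + (i - A.length - 1) := by omega
                rw [hk, hdropEq]
                exact hminB _ (by omega)
          rw [hf] at hfind
          have hm : m = A.length + 1 + mb := by exact_mod_cast hfind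
          rw [ihb.2 mb hfB']
          simp only [Option.map_some]
          congr 1
          subst hm
          rw [List.take_append, List.take_of_length_le (show A.length ≤ A.length + 1 + mb by omega)]
          have h1 : A.length + 1 + mb - A.length = mb + 1 := by omega
          rw [h1, List.take_succ_cons, List.count_append, List.count_cons]
          have : A.count '\n' = 0 := List.count_eq_zero.mpr (fun hx => hA hx)
          simp [this]
    · exact case_nonl cs hmem

theorem mainFind (n : List Char) (hn : '\n' ∉ n) (cs : List Char) :
    (PySem.Chars.find cs n = -1 → firstHit n (linesOf cs) = none)
    ∧ (∀ m : Nat, PySem.Chars.find cs n = (m : Int) →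
        firstHit n (linesOf cs) = some ((cs.take m).count '\n')) :=
  mainFind_aux n hn cs.length cs (Nat.le_refl _)

theorem singleton_infix_iff {x : Char} {l : List Char} : [x] <:+: l ↔ x ∈ l := by
  constructor
  · rintro ⟨s, t, h⟩
    rw [← h]
    simp
  · intro h
    obtain ⟨s, t, h⟩ := List.mem_iff_append.mp h
    exact ⟨s, t, by rw [h]; simp⟩

-- ===== VERDICT (by name: the statement is the Claim_ definition above) =====
theorem find_power_section_spec : Claim_equal_find_power_section := by
  intro text pn ctx _
  unfold Spec_find_power_section
  obtain ⟨LS, hLS, hmapLS⟩ : ∃ LS, PySem.Str.split? text "\n" = some LS ∧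
      LS.map String.toList = linesOf text.toList := by
    have hb := PySem.Str.split?_map text "\n"
    rw [show ("\n" : String).toList = ['\n'] from rfl, PySem.Chars.split?] at hb
    simp only [List.isEmpty_cons, if_false, Bool.false_eq_true] at hb
    rw [splitOn_nl] at hb
    cases h : PySem.Str.split? text "\n" with
    | none => rw [h] at hb; simp at hb
    | some LS =>
      rw [h] at hb
      simp only [Option.map_some, Option.some.injEq] at hb
      exact ⟨LS, rfl, hb⟩
  have hloop : pyFindLoop pn LS 0
      = firstHit (PySem.Chars.lower pn.toList) (linesOf (PySem.Chars.lower text.toList)) := by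
    rw [pyFindLoop_eq]
    have hm : LS.map (fun s => PySem.Chars.lower s.toList)
        = linesOf (PySem.Chars.lower text.toList) := by
      rw [linesOf_lower, ← hmapLS, List.map_map]
      rfl
    rw [hm]
    cases firstHit (PySem.Chars.lower pn.toList) (linesOf (PySem.Chars.lower text.toList)) with
    | none => rfl
    | some k => simp
  have hfind : PySem.Str.find (PySem.Str.lower text) (PySem.Str.lower pn)
      = PySem.Chars.find (PySem.Chars.lower text.toList) (PySem.Chars.lower pn.toList) := by
    rw [PySem.Str.find_eq, PySem.Str.toList_lower, PySem.Str.toList_lower]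
  cases hnl : PySem.Str.isIn "\n" pn with
  | true =>
    -- the needle contains a newline: A's loop can never hit, B returns None up front
    have hmem : '\n' ∈ PySem.Chars.lower pn.toList := by
      rw [PySem.Str.isIn_eq, show ("\n" : String).toList = ['\n'] from rfl,
        PySem.Chars.isIn_iff_infix, singleton_infix_iff] at hnl
      exact (mem_lower_nl _).mpr hnl
    rw [find_power_section, find_power_section_alt, if_pos hnl, hLS]
    simp only [Option.getD_some]
    rw [hloop, firstHit_none_of_nl hmem]
  | false =>
    have hn : '\n' ∉ PySem.Chars.lower pn.toList := by
      rw [PySem.Str.isIn_eq, show ("\n" : String).toList = ['\n'] from rfl] at hnl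
      intro hmem
      rw [PySem.Chars.isIn_eq_false_iff] at hnl
      exact hnl (singleton_infix_iff.mpr ((mem_lower_nl _).mp hmem))
    have hmain := mainFind _ hn (PySem.Chars.lower text.toList)
    rw [find_power_section, find_power_section_alt, if_neg (by rw [hnl]; simp), hLS]
    simp only [Option.getD_some]
    by_cases hf : PySem.Chars.find (PySem.Chars.lower text.toList) (PySem.Chars.lower pn.toList) = -1
    · rw [hloop, hmain.1 hf]
      rw [if_pos (by rw [hfind, hf]; rfl)]
    · have hge : 0 ≤ PySem.Chars.find (PySem.Chars.lower text.toList) (PySem.Chars.lower pn.toList) := by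
        have := PySem.Chars.neg_one_le_find (PySem.Chars.lower text.toList) (PySem.Chars.lower pn.toList)
        omega
      set m := (PySem.Chars.find (PySem.Chars.lower text.toList) (PySem.Chars.lower pn.toList)).toNat with hmdef
      have hf' : PySem.Chars.find (PySem.Chars.lower text.toList) (PySem.Chars.lower pn.toList) = (m : Int) :=
        (Int.toNat_of_nonneg hge).symm
      rw [hloop, hmain.2 m hf']
      rw [if_neg (by rw [hfind, hf']; simp)]
      have hcount : (PySem.Str.count (PySem.Str.slice (PySem.Str.lower text) none
          (some (PySem.Str.find (PySem.Str.lower text) (PySem.Str.lower pn)))) "\n" : Int)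
          = ((((PySem.Chars.lower text.toList).take m).count '\n' : Nat) : Int) := by
      -- count of newlines in low[:idx] = count in take m
        rw [PySem.Str.count_eq, show ("\n" : String).toList = ['\n'] from rfl, count_nl,
          PySem.Str.toList_slice, hfind, hf', PySem.Chars.slice_eq_listSlice,
          PySem.List.slice_to _ (by exact_mod_cast Int.natCast_nonneg m)]
        simp
      rw [hcount]
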